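-- pv_equiv track=rewrite | github.com/abria/TeraStitcher | src/utils/pyscripts/paraconverter.py | create_starts_end
-- ===== SOURCE A (Python) =====
-- def create_starts_end (array, start_point=0,open_dx=True):
--    """
--    Create arrays containing all the starting and ending indexes for the tiles on the desidered direction
--    Input:
--       array = Array containing the size for each tile on the desidered direction
--       start_point = Starting index for the input immage (optional)
--       open_dx = If true (the default value) ==> ending indexes = subsequent starting indexes ==> Open end
--    Output:
--       star_arr = Array containing all the starting indexes for the tiles on the desidered direction
--       end_arr = Array containing all the ending indexes for the tiles on the desidered direction
--    """
--    len_arr = len(array)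
--    ind_arr = range(0, len_arr)
--    start_arr = []
--    end_arr = []
--    if open_dx:
--       dx_pad = 0
--    else:
--       dx_pad = -1
--    for i in ind_arr:
--       if i != 0:
--          start_point = start_point + array[i-1]
--       start_arr.append(start_point)
--       end_point = start_point + array[i] + dx_pad
--       end_arr.append(end_point)
--    return (start_arr, end_arr)
-- ===== SOURCE B (Python) =====
-- def create_starts_end(array, start_point=0, open_dx=True):
--     # Back-to-front: compute the total extent first, then walk the tiles in
--     # reverse, peeling each tile off the running right boundary.
--     bound = start_point + sum(array)
--     starts = []
--     ends = []
--     for v in reversed(array):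
--         starts.append(bound - v)
--         ends.append(bound if open_dx else bound - 1)
--         bound -= v
--     starts.reverse()
--     ends.reverse()
--     return (starts, ends)
-- ===== Notes on version B (the rewrite author's own statement) =====
-- stated objective: alternative
-- what changed: Instead of A's forward index loop accumulating start points with array[i-1]/array[i] reads, B computes the total extent once and walks the tiles in reverse, deriving each start by subtracting the tile size from the running right boundary, building both outputs back-to-front.
import Mathlib
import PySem

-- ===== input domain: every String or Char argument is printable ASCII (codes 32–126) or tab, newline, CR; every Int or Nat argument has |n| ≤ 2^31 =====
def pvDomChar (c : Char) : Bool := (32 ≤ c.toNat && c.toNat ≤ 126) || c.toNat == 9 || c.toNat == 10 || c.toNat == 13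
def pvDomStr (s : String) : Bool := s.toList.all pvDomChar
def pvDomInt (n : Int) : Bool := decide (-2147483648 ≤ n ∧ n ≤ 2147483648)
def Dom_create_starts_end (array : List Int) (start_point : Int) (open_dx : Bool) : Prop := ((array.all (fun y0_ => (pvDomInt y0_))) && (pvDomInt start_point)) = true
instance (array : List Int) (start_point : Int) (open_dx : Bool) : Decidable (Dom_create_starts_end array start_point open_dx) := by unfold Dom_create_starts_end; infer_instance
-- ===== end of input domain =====

-- B walks the tiles in reverse from the precomputed total extent, building both outputs back-to-front (objective: alternative).

-- ===== PORT A =====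
-- loop body of A's 'for i in ind_arr'
def pvBodyA (arr : List Int) (pad : Int) (st : Int × List Int × List Int) (i : Int) : Int × List Int × List Int :=
  let sp := if i ≠ 0 then st.1 + PySem.List.pyGetD arr (i - 1) 0 else st.1
  let sa := st.2.1 ++ [sp]
  let ep := sp + PySem.List.pyGetD arr i 0 + pad
  (sp, sa, st.2.2 ++ [ep])

def create_starts_end (array : List Int) (start_point : Int) (open_dx : Bool) : List Int × List Int :=
  let len_arr : Int := array.length
  let ind_arr := PySem.List.pyRange 0 len_arr 1
  let dx_pad : Int := if open_dx then 0 else -1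
  let st := ind_arr.foldl (pvBodyA array dx_pad) (start_point, [], [])
  (st.2.1, st.2.2)

-- ===== PORT B =====
def create_starts_end_alt (array : List Int) (start_point : Int) (open_dx : Bool) : List Int × List Int :=
  let bound : Int := start_point + array.sum
  let st := array.reverse.foldl
      (fun (s : Int × List Int × List Int) v =>
        (s.1 - v, s.2.1 ++ [s.1 - v], s.2.2 ++ [if open_dx then s.1 else s.1 - 1]))
      (bound, [], [])
  (st.2.1.reverse, st.2.2.reverse)

-- ===== PRECONDITION & SPEC =====
def Spec_create_starts_end (array : List Int) (start_point : Int) (open_dx : Bool) (out : List Int × List Int) : Prop := out = create_starts_end_alt array start_point open_dx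
instance (array : List Int) (start_point : Int) (open_dx : Bool) (out : List Int × List Int) : Decidable (Spec_create_starts_end array start_point open_dx out) := by unfold Spec_create_starts_end; infer_instance

-- ===== CLAIM (what is proved, stated in full; the proofs are below) =====
def Claim_equal_create_starts_end : Prop := ∀ (array : List Int) (start_point : Int) (open_dx : Bool), Dom_create_starts_end array start_point open_dx → Spec_create_starts_end array start_point open_dx (create_starts_end array start_point open_dx)

-- ===== LEMMAS AND PROOFS =====

-- reference shapes: the list of tile starts and tile ends from a start value
def pvStarts : List Int → Int → List Int
  | [], _ => []
  | v :: t, s => s :: pvStarts t (s + v)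

def pvEnds : List Int → Int → Int → List Int
  | [], _, _ => []
  | v :: t, s, pad => (s + v + pad) :: pvEnds t (s + v) pad

-- A's loop from index 1 on, carrying array[i-1] explicitly
def pvLoopA : List Int → Int → Int → List Int → List Int → Int → Int × List Int × List Int
  | [], _, sp, sa, ea, _ => (sp, sa, ea)
  | v :: t, lastv, sp, sa, ea, pad =>
      pvLoopA t v (sp + lastv) (sa ++ [sp + lastv]) (ea ++ [sp + lastv + v + pad]) pad

lemma pvLoopA_eq : ∀ (t : List Int) (lastv sp : Int) (sa ea : List Int) (pad : Int),
    (pvLoopA t lastv sp sa ea pad).2.1 = sa ++ pvStarts t (sp + lastv) ∧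
    (pvLoopA t lastv sp sa ea pad).2.2 = ea ++ pvEnds t (sp + lastv) pad := by
  intro t
  induction t with
  | nil => intro lastv sp sa ea pad; simp [pvLoopA, pvStarts, pvEnds]
  | cons v t ih =>
      intro lastv sp sa ea pad
      have h := ih v (sp + lastv) (sa ++ [sp + lastv]) (ea ++ [sp + lastv + v + pad]) pad
      simp [pvLoopA, pvStarts, pvEnds, h.1, h.2]

lemma pvGetD_append_last (pre suf : List Int) (h : pre ≠ []) :
    PySem.List.pyGetD (pre ++ suf) ((pre.length : Int) - 1) 0 = pre.getLast h := by
  have hlen : 0 < pre.length := List.length_pos_iff.mpr h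
  have hcast : ((pre.length : Int) - 1) = ((pre.length - 1 : Nat) : Int) := by omega
  rw [hcast, PySem.List.pyGetD_natCast]
  have hlt : pre.length - 1 < pre.length := by omega
  rw [List.getD_eq_getElem?_getD, List.getElem?_append_left hlt]
  simp [List.getElem?_eq_getElem hlt, List.getLast_eq_getElem]

lemma pvGetD_append_head (pre : List Int) (v : Int) (suf : List Int) :
    PySem.List.pyGetD (pre ++ v :: suf) ((pre.length : Int)) 0 = v := by
  rw [PySem.List.pyGetD_natCast, List.getD_eq_getElem?_getD, List.getElem?_append_right (le_refl _)]
  simp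

-- A's fold over range(pre.length, len(pre++suf)) is pvLoopA
lemma pvFold_eq_loopA : ∀ (suf pre : List Int) (h : pre ≠ []) (sp : Int) (sa ea : List Int) (pad : Int),
    (PySem.List.pyRange (pre.length) ((pre ++ suf).length) 1).foldl (pvBodyA (pre ++ suf) pad) (sp, sa, ea)
      = pvLoopA suf (pre.getLast h) sp sa ea pad := by
  intro suf
  induction suf with
  | nil =>
      intro pre h sp sa ea pad
      rw [PySem.List.pyRange_one_eq_nil (by simp)]
      simp [pvLoopA]
  | cons v t ih =>
      intro pre h sp sa ea pad
      have hlt : (pre.length : Int) < ((pre ++ v :: t).length : Int) := by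
        simp
      rw [PySem.List.pyRange_one_cons hlt]
      have hlen0 : pre.length ≠ 0 := fun hc => h (List.length_eq_zero_iff.mp hc)
      have hbody : pvBodyA (pre ++ v :: t) pad (sp, sa, ea) (pre.length : Int)
          = (sp + pre.getLast h, sa ++ [sp + pre.getLast h],
             ea ++ [sp + pre.getLast h + v + pad]) := by
        simp only [pvBodyA]
        rw [if_pos (by exact_mod_cast hlen0)]
        rw [pvGetD_append_last pre (v :: t) h, pvGetD_append_head]
      rw [List.foldl_cons, hbody]
      have hresh : (pre ++ [v]) ≠ [] := by simp
      have hre : pre ++ v :: t = (pre ++ [v]) ++ t := by simp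
      have hlenc : (pre.length : Int) + 1 = ((pre ++ [v]).length : Int) := by
        simp [List.length_append]
      rw [hlenc, hre]
      rw [ih (pre ++ [v]) hresh]
      simp [pvLoopA]

-- A computes (pvStarts, pvEnds)
lemma pvA_eq (array : List Int) (s pad : Int) :
    ((PySem.List.pyRange 0 (array.length : Int) 1).foldl (pvBodyA array pad) (s, [], [])).2.1
      = pvStarts array s ∧
    ((PySem.List.pyRange 0 (array.length : Int) 1).foldl (pvBodyA array pad) (s, [], [])).2.2
      = pvEnds array s pad := by
  cases array with
  | nil => simp [PySem.List.pyRange_one_eq_nil, pvStarts, pvEnds]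
  | cons v t =>
      have h0 : (0 : Int) < (((v :: t).length : Int)) := by simp
      rw [PySem.List.pyRange_one_cons h0]
      have hbody0 : pvBodyA (v :: t) pad (s, [], []) 0
          = (s, [s], [s + v + pad]) := by
        simp [pvBodyA, PySem.List.pyGetD_zero_cons]
      rw [List.foldl_cons, hbody0]
      have hF := pvFold_eq_loopA t [v] (by simp) s [s] [s + v + pad] pad
      simp only [List.singleton_append, List.length_singleton, Nat.cast_one, List.getLast_singleton] at hF
      rw [show ((0 : Int) + 1) = (1 : Int) from by norm_num, hF]
      have h := pvLoopA_eq t ([v].getLast (by simp)) s [s] [s + v + pad] pad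
      simp only [List.getLast_singleton] at h
      constructor
      · rw [h.1]; simp [pvStarts]
      · rw [h.2]; simp [pvEnds]

-- B's reverse walk computes the same (pvStarts, pvEnds) pair
lemma pvB_foldr : ∀ (array : List Int) (s0 : Int) (dx : Bool),
    array.foldr
      (fun v (s : Int × List Int × List Int) =>
        (s.1 - v, s.2.1 ++ [s.1 - v], s.2.2 ++ [if dx then s.1 else s.1 - 1]))
      (s0 + array.sum, [], [])
      = (s0, (pvStarts array s0).reverse, (pvEnds array s0 (if dx then 0 else -1)).reverse) := by
  intro array
  induction array with
  | nil => intro s0 dx; simp [pvStarts, pvEnds]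
  | cons v t ih =>
      intro s0 dx
      have hsum : s0 + (v :: t).sum = (s0 + v) + t.sum := by simp; ring
      rw [List.foldr_cons, hsum, ih (s0 + v) dx]
      cases dx <;> simp [pvStarts, pvEnds] <;> ring_nf

lemma pvB_eq : ∀ (array : List Int) (s : Int) (dx : Bool),
    create_starts_end_alt array s dx
      = (pvStarts array s, pvEnds array s (if dx then 0 else -1)) := by
  intro array s dx
  simp only [create_starts_end_alt, List.foldl_reverse]
  rw [show (fun (x : Int) (y : Int × List Int × List Int) =>
        (y.1 - x, y.2.1 ++ [y.1 - x], y.2.2 ++ [if dx then y.1 else y.1 - 1]))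
      = (fun v (s : Int × List Int × List Int) =>
        (s.1 - v, s.2.1 ++ [s.1 - v], s.2.2 ++ [if dx then s.1 else s.1 - 1])) from rfl,
    pvB_foldr array s dx]
  simp

-- ===== VERDICT (by name: the statement is the Claim_ definition above) =====
theorem create_starts_end_spec : Claim_equal_create_starts_end := by
  intro array start_point open_dx _
  have hA := pvA_eq array start_point (if open_dx then 0 else -1)
  simp only [Spec_create_starts_end, create_starts_end, pvB_eq]
  exact Prod.ext hA.1 hA.2
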